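-- pv_equiv track=rewrite | github.com/seedhaval/scripts | Game_Action/bin/calc.py | reshape_to_3d
-- ===== SOURCE A (Python) =====
-- def reshape_to_3d(lst, rows_per_page, cols_per_row):
--     result = []
--     page = []
--     row = []
--     for idx, value in enumerate(lst):
--         row.append(value)
--         if len(row) == cols_per_row:
--             page.append(row)
--             row = []
--         if len(page) == rows_per_page:
--             result.append(page)
--             page = []
--     if row:
--         page.append(row)
--     if page:
--         result.append(page)
--     return result
-- ===== SOURCE B (Python) =====
-- def reshape_to_3d(lst, rows_per_page, cols_per_row):
--     rows = [lst[i:i + cols_per_row] for i in range(0, len(lst), cols_per_row)]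
--     return [rows[j:j + rows_per_page] for j in range(0, len(rows), rows_per_page)]
-- ===== Notes on version B (the rewrite author's own statement) =====
-- stated objective: simpler
-- what changed: Replaced the single enumerate loop with row/page/result accumulators and two end-of-loop flush branches by two index-driven slicing passes: chunk the flat list into rows with range(0,n,cols_per_row), then chunk the row list into pages with range(0,m,rows_per_page).
-- outside the precondition, e.g. on reshape_to_3d([1, 2, 3], 2, 0): A returns [[[1, 2, 3]]], B raises ValueError; on reshape_to_3d([1, 2], -1, 1): A returns [[[1], [2]]], B returns []
import Mathlib
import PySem

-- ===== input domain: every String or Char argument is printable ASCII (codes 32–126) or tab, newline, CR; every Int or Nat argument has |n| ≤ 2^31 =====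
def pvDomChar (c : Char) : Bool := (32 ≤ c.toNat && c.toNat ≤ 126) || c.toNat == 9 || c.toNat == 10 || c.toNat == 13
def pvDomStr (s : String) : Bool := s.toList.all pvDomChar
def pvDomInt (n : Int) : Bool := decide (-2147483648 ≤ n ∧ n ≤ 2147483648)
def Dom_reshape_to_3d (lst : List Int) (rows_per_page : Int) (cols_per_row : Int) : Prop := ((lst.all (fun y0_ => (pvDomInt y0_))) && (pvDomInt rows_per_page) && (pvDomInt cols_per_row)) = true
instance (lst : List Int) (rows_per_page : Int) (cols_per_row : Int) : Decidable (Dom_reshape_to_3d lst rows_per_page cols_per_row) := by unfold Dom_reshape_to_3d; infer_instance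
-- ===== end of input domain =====

-- B reshapes by two index-driven slicing passes instead of A's single accumulator loop (simpler decomposition, same cost); equal whenever rows_per_page and cols_per_row are positive.

-- ===== PORT A =====
-- A-side helper: the body of A's for-loop (append value to row, flush a full row into page, flush a full page into result)
def stepA (rows_per_page cols_per_row : Int)
    (st : List (List (List Int)) × List (List Int) × List Int) (value : Int) :
    List (List (List Int)) × List (List Int) × List Int :=
  let row := st.2.2 ++ [value]
  let page := if (row.length : Int) = cols_per_row then st.2.1 ++ [row] else st.2.1
  let row' := if (row.length : Int) = cols_per_row then ([] : List Int) else row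
  let result := if (page.length : Int) = rows_per_page then st.1 ++ [page] else st.1
  let page' := if (page.length : Int) = rows_per_page then ([] : List (List Int)) else page
  (result, page', row')

-- A's 'for idx, value in enumerate(lst)': the fold runs over the enumerated pairs; the index idx is unused, as in A
def reshape_to_3d (lst : List Int) (rows_per_page : Int) (cols_per_row : Int) : List (List (List Int)) :=
  let st := (PySem.List.enumerate lst 0).foldl
    (fun st p => stepA rows_per_page cols_per_row st p.2) ([], [], [])
  let page := if st.2.2 ≠ [] then st.2.1 ++ [st.2.2] else st.2.1
  if page ≠ [] then st.1 ++ [page] else st.1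

-- ===== PORT B =====
def reshape_to_3d_alt (lst : List Int) (rows_per_page : Int) (cols_per_row : Int) : List (List (List Int)) :=
  let rows := (PySem.List.pyRange 0 (lst.length : Int) cols_per_row).map
    (fun i => PySem.List.slice lst (some i) (some (i + cols_per_row)))
  (PySem.List.pyRange 0 (rows.length : Int) rows_per_page).map
    (fun j => PySem.List.slice rows (some j) (some (j + rows_per_page)))

-- ===== PRECONDITION & SPEC =====
-- Pre_ restricts to the natural domain of positive chunk sizes: it excludes non-positive
-- rows_per_page/cols_per_row, outside the task's natural domain, where A still returns a value
-- (everything lumped into one row/page — an accident of its accumulator loop) while B's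
-- range-based slicing raises ValueError (step 0) or yields [] (negative step).
def Pre_reshape_to_3d (lst : List Int) (rows_per_page : Int) (cols_per_row : Int) : Prop :=
  1 ≤ rows_per_page ∧ 1 ≤ cols_per_row
instance (lst : List Int) (rows_per_page : Int) (cols_per_row : Int) : Decidable (Pre_reshape_to_3d lst rows_per_page cols_per_row) := by unfold Pre_reshape_to_3d; infer_instance
def pvWitness_reshape_to_3d : List Int × Int × Int := ([1, 2, 3, 4, 5], 2, 2)

def Spec_reshape_to_3d (lst : List Int) (rows_per_page : Int) (cols_per_row : Int) (out : List (List (List Int))) : Prop := out = reshape_to_3d_alt lst rows_per_page cols_per_row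
instance (lst : List Int) (rows_per_page : Int) (cols_per_row : Int) (out : List (List (List Int))) : Decidable (Spec_reshape_to_3d lst rows_per_page cols_per_row out) := by unfold Spec_reshape_to_3d; infer_instance

-- ===== CLAIM (what is proved, stated in full; the proofs are below) =====
def Claim_equal_reshape_to_3d : Prop := ∀ (lst : List Int) (rows_per_page : Int) (cols_per_row : Int), Dom_reshape_to_3d lst rows_per_page cols_per_row → Pre_reshape_to_3d lst rows_per_page cols_per_row → Spec_reshape_to_3d lst rows_per_page cols_per_row (reshape_to_3d lst rows_per_page cols_per_row)

-- ===== LEMMAS AND PROOFS =====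

-- the common mathematical object: the list split into blocks of c (last block possibly short)
def chunk {α : Type} (c : Nat) (xs : List α) : List (List α) :=
  if h : c = 0 ∨ xs = [] then [] else xs.take c :: chunk c (xs.drop c)
termination_by xs.length
decreasing_by
  rcases xs with _ | ⟨x, xs⟩
  · simp at h
  · simp [List.length_drop]; omega

theorem chunk_nil {α : Type} (c : Nat) : chunk c ([] : List α) = [] := by
  rw [chunk]; simp

theorem chunk_of_short {α : Type} {c : Nat} {xs : List α} (h0 : xs ≠ [])
    (h : xs.length ≤ c) : chunk c xs = [xs] := by
  rw [chunk]
  have hc : ¬ (c = 0 ∨ xs = []) := by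
    rcases xs with _ | ⟨x, xs⟩ <;> simp_all; omega
  rw [dif_neg hc]
  have h1 : xs.take c = xs := List.take_of_length_le h
  have h2 : xs.drop c = [] := List.drop_eq_nil_of_le h
  rw [h1, h2, chunk_nil]

theorem chunk_cons_block {α : Type} {c : Nat} {ys : List α} (xs : List α)
    (hc : c ≠ 0) (h : ys.length = c) : chunk c (ys ++ xs) = ys :: chunk c xs := by
  rw [chunk]
  have hys : ys ≠ [] := by intro hy; subst hy; simp at h; omega
  have hne : ¬ (c = 0 ∨ ys ++ xs = []) := by
    simp [hc, hys]
  rw [dif_neg hne]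
  have h1 : (ys ++ xs).take c = ys := by
    rw [← h]; exact List.take_left
  have h2 : (ys ++ xs).drop c = xs := by
    rw [← h]; exact List.drop_left
  rw [h1, h2]

-- fold over enumerate with the index unused is a fold over the list
theorem foldl_enumerate_snd {α β : Type} (g : β → α → β) :
    ∀ (xs : List α) (s : Int) (init : β),
      (PySem.List.enumerate xs s).foldl (fun st p => g st p.2) init = xs.foldl g init := by
  intro xs
  induction xs with
  | nil => intro s init; simp [PySem.List.enumerate_nil]
  | cons x xs ih => intro s init; simp [PySem.List.enumerate_cons, ih]

theorem pyRange_pos_cons {a b s : Int} (hs : 0 < s) (hab : a < b) :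
    PySem.List.pyRange a b s = a :: PySem.List.pyRange (a + s) b s := by
  rw [PySem.List.pyRange_of_pos _ _ hs, PySem.List.pyRange_of_pos _ _ hs]
  have hcount : (if a < b then ((b - a + s - 1) / s).toNat else 0)
      = (if a + s < b then ((b - (a + s) + s - 1) / s).toNat else 0) + 1 := by
    rw [if_pos hab]
    by_cases h2 : a + s < b
    · rw [if_pos h2]
      have he : b - a + s - 1 = (b - a - 1) + 1 * s := by ring
      have hdiv : (b - a + s - 1) / s = (b - a - 1) / s + 1 := by
        rw [he, Int.add_mul_ediv_right _ _ (by omega)]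
      have hx : b - (a + s) + s - 1 = b - a - 1 := by ring
      have hnn : 0 ≤ (b - a - 1) / s := Int.ediv_nonneg (by omega) (by omega)
      rw [hx]; omega
    · rw [if_neg h2]
      have he : b - a + s - 1 = (b - a - 1) + 1 * s := by ring
      have hz : (b - a - 1) / s = 0 := Int.ediv_eq_zero_of_lt (by omega) (by omega)
      have hdiv : (b - a + s - 1) / s = 1 := by
        rw [he, Int.add_mul_ediv_right _ _ (by omega), hz]
        omega
      omega
  rw [hcount, List.range_succ_eq_map, List.map_cons, List.map_map]
  congr 1
  · simp
  · apply List.map_congr_left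
    intro k _
    simp [Function.comp]
    ring

theorem pyRange_pos_shift (a b : Int) {s : Int} (hs : 0 < s) :
    PySem.List.pyRange (a + s) b s = (PySem.List.pyRange a (b - s) s).map (· + s) := by
  rw [PySem.List.pyRange_of_pos _ _ hs, PySem.List.pyRange_of_pos _ _ hs, List.map_map]
  have hcount : (if a + s < b then ((b - (a + s) + s - 1) / s).toNat else 0)
      = (if a < b - s then ((b - s - a + s - 1) / s).toNat else 0) := by
    have h1 : b - (a + s) + s - 1 = b - s - a + s - 1 := by ring
    rw [h1]
    by_cases h : a + s < b
    · rw [if_pos h, if_pos (by omega)]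
    · rw [if_neg h, if_neg (by omega)]
  rw [hcount]
  apply List.map_congr_left
  intro k _
  simp [Function.comp]
  ring

-- B's slicing pass computes chunk
theorem sliceChunks {α : Type} {c : Int} (hc : 0 < c) :
    ∀ (xs : List α),
      (PySem.List.pyRange 0 (xs.length : Int) c).map
        (fun i => PySem.List.slice xs (some i) (some (i + c))) = chunk c.toNat xs := by
  suffices h : ∀ (n : Nat) (xs : List α), xs.length = n →
      (PySem.List.pyRange 0 (xs.length : Int) c).map
        (fun i => PySem.List.slice xs (some i) (some (i + c))) = chunk c.toNat xs by
    intro xs; exact h xs.length xs rfl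
  intro n
  induction n using Nat.strong_induction_on with
  | _ n ih =>
    intro xs hlen
    by_cases hxs : xs = []
    · subst hxs
      rw [PySem.List.pyRange_of_pos _ _ hc, chunk_nil]
      simp
    · have hpos : (0 : Int) < (xs.length : Int) := by
        rcases xs with _ | ⟨y, ys⟩
        · exact absurd rfl hxs
        · simp
      rw [pyRange_pos_cons hc hpos, List.map_cons]
      have hhead : PySem.List.slice xs (some 0) (some (0 + c)) = xs.take c.toNat := by
        rw [PySem.List.slice_toNat _ (by omega) (by omega)]
        simp
      rw [hhead, pyRange_pos_shift 0 _ hc, List.map_map]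
      have htail : ∀ i ∈ PySem.List.pyRange 0 ((xs.length : Int) - c) c,
          ((fun i => PySem.List.slice xs (some i) (some (i + c))) ∘ (· + c)) i
            = PySem.List.slice (xs.drop c.toNat) (some i) (some (i + c)) := by
        intro i hi
        have h0i : 0 ≤ i := ((PySem.List.mem_pyRange_iff_of_pos hc i).mp hi).1
        simp only [Function.comp]
        rw [PySem.List.slice_toNat _ (by omega) (by omega),
            PySem.List.slice_toNat _ (by omega) (by omega)]
        rw [List.drop_drop]
        have h1 : c.toNat + i.toNat = (i + c).toNat := by omega
        have h2 : (i + c + c).toNat - (i + c).toNat = (i + c).toNat - i.toNat := by omega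
        rw [h1, h2]
      rw [List.map_congr_left htail]
      by_cases hcl : c ≤ (xs.length : Int)
      · have hdl : ((xs.drop c.toNat).length : Int) = (xs.length : Int) - c := by
          simp [List.length_drop]; omega
        have hne : ¬ (c.toNat = 0 ∨ xs = []) := by simp [hxs]; omega
        have hstep : chunk c.toNat xs = xs.take c.toNat :: chunk c.toNat (xs.drop c.toNat) := by
          conv_lhs => rw [chunk]
          rw [dif_neg hne]
        rw [← hdl, ih (xs.drop c.toNat).length (by simp [List.length_drop]; omega) _ rfl, hstep]
      · have hr0 : PySem.List.pyRange 0 ((xs.length : Int) - c) c = [] := by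
          rw [PySem.List.pyRange_of_pos _ _ hc, if_neg (by omega)]
          simp
        rw [hr0, chunk_of_short hxs (by omega)]
        simp [List.take_of_length_le (show xs.length ≤ c.toNat by omega)]

def finA (st : List (List (List Int)) × List (List Int) × List Int) : List (List (List Int)) :=
  let page := if st.2.2 ≠ [] then st.2.1 ++ [st.2.2] else st.2.1
  if page ≠ [] then st.1 ++ [page] else st.1

-- A's loop invariant: finishing the fold from state (R, P, ρ) yields R followed by the pages of P ++ rows of ρ ++ xs
theorem foldA {r c : Int} (hr : 0 < r) (hc : 0 < c) :
    ∀ (xs : List Int) (R : List (List (List Int))) (P : List (List Int)) (ρ : List Int),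
      P.length < r.toNat → ρ.length < c.toNat →
      finA (xs.foldl (stepA r c) (R, P, ρ)) = R ++ chunk r.toNat (P ++ chunk c.toNat (ρ ++ xs)) := by
  intro xs
  induction xs with
  | nil =>
    intro R P ρ hP hρ
    simp only [List.foldl_nil, List.append_nil]
    by_cases hρ0 : ρ = []
    · subst hρ0
      rw [chunk_nil, List.append_nil]
      by_cases hP0 : P = []
      · subst hP0; simp [finA, chunk_nil]
      · rw [chunk_of_short hP0 (by omega)]
        simp [finA, hP0]
    · rw [chunk_of_short hρ0 (by omega),
          chunk_of_short (by simp : P ++ [ρ] ≠ []) (by simp; omega)]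
      simp [finA, hρ0]
  | cons v xs ih =>
    intro R P ρ hP hρ
    have hcN : c.toNat ≠ 0 := by omega
    have hrN : r.toNat ≠ 0 := by omega
    rw [List.foldl_cons]
    by_cases h1 : (((ρ ++ [v]).length : Int)) = c
    · by_cases h2 : (((P ++ [ρ ++ [v]]).length : Int)) = r
      · have hst : stepA r c (R, P, ρ) v = (R ++ [P ++ [ρ ++ [v]]], [], []) := by
          simp only [stepA, h1, h2, if_pos]
        rw [hst, ih _ _ _ (by simp; omega) (by simp; omega)]
        simp only [List.nil_append]
        conv_rhs => rw [show ρ ++ v :: xs = (ρ ++ [v]) ++ xs by simp,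
          chunk_cons_block xs hcN (by simp at h1 ⊢; omega),
          show P ++ (ρ ++ [v]) :: chunk c.toNat xs = (P ++ [ρ ++ [v]]) ++ chunk c.toNat xs by simp,
          chunk_cons_block (chunk c.toNat xs) hrN (by simp at h2 ⊢; omega)]
        simp
      · have hst : stepA r c (R, P, ρ) v = (R, P ++ [ρ ++ [v]], []) := by
          simp only [stepA, h1, h2, if_pos, ite_false]
        have hlen : (P ++ [ρ ++ [v]]).length < r.toNat := by simp at h2 ⊢; omega
        rw [hst, ih _ _ _ hlen (by simp; omega)]
        simp only [List.nil_append]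
        conv_rhs => rw [show ρ ++ v :: xs = (ρ ++ [v]) ++ xs by simp,
          chunk_cons_block xs hcN (by simp at h1 ⊢; omega)]
        simp
    · have hP2 : ¬ ((P.length : Int) = r) := by omega
      have hst : stepA r c (R, P, ρ) v = (R, P, ρ ++ [v]) := by
        simp only [stepA, h1, hP2, ite_false]
      have hlen : (ρ ++ [v]).length < c.toNat := by simp at h1 ⊢; omega
      rw [hst, ih _ _ _ hP (by omega)]
      simp

-- ===== VERDICT (by name: the statement is the Claim_ definition above) =====
theorem reshape_to_3d_spec : Claim_equal_reshape_to_3d := by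
  intro lst r c _ hpre
  obtain ⟨hr, hc⟩ := hpre
  unfold Spec_reshape_to_3d
  have hr' : (0 : Int) < r := by omega
  have hc' : (0 : Int) < c := by omega
  have hA : reshape_to_3d lst r c = chunk r.toNat (chunk c.toNat lst) := by
    show finA ((PySem.List.enumerate lst 0).foldl (fun st p => stepA r c st p.2) ([], [], [])) = _
    rw [foldl_enumerate_snd (stepA r c) lst 0 ([], [], [])]
    have := foldA hr' hc' lst [] [] [] (by simp; omega) (by simp; omega)
    simpa using this
  have hB : reshape_to_3d_alt lst r c = chunk r.toNat (chunk c.toNat lst) := by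
    show (PySem.List.pyRange 0 _ r).map _ = _
    rw [sliceChunks hc' lst, sliceChunks hr' (chunk c.toNat lst)]
  rw [hA, hB]
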